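-- pv_equiv track=rewrite | github.com/bilalakil/challenges | codechef/snckql17/snakeeat.py | bear_limak_is_back
-- ===== SOURCE A (Python) =====
-- def bear_limak_is_back(n, q, snakes, queries):
--     snakes = sorted(snakes, reverse=True)
--
--     query_results = []
--     for k in queries:
--         i = -1
--         j = 0
--
--         while i != n - 1:
--             i += 1
--             l = snakes[i]
--
--             if l >= k: continue
--
--             deficit = k - l
--
--             if n - 1 - i - j < deficit:
--                 i -= 1
--                 break
--
--             j += deficit
--
--         query_results.append(i + 1)
--
--     return query_results
-- ===== SOURCE B (Python) =====
-- def bear_limak_is_back(n, q, snakes, queries):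
--     # sort descending once, prefix sums, and per query two binary searches
--     # on the monotone feasibility condition (answer = max m with
--     # sum of deficits over the top m snakes <= n - m).
--     s = sorted(snakes, reverse=True)[:n]
--     ns = len(s)
--     pre = [0]
--     for x in s:
--         pre.append(pre[-1] + x)
--     res = []
--     for k in queries:
--         # c = number of snakes >= k (they need no growth)
--         lo, hi = 0, ns
--         while lo < hi:
--             mid = (lo + hi) // 2
--             if s[mid] >= k:
--                 lo = mid + 1
--             else:
--                 hi = mid
--         c = lo
--         # largest m in [c, ns] with k*(m-c) - (pre[m]-pre[c]) <= ns - m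
--         lo, hi = c, ns
--         while lo < hi:
--             mid = (lo + hi + 1) // 2
--             if k * (mid - c) - (pre[mid] - pre[c]) <= ns - mid:
--                 lo = mid
--             else:
--                 hi = mid - 1
--         res.append(lo)
--     return res
-- ===== Notes on version B (the rewrite author's own statement) =====
-- stated objective: faster
-- what changed: B replaces A's per-query linear greedy scan with one descending sort plus prefix sums and, per query, two binary searches on the monotone feasibility condition (largest m with total deficit of the top m snakes <= n - m).
-- outside the precondition, e.g. on bear_limak_is_back(-2, 1, [9, 3, 1], [2]): A returns [2], B returns [1]; on bear_limak_is_back(2, 1, [5], [1]): A raises IndexError, B returns [1]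
import Mathlib
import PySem

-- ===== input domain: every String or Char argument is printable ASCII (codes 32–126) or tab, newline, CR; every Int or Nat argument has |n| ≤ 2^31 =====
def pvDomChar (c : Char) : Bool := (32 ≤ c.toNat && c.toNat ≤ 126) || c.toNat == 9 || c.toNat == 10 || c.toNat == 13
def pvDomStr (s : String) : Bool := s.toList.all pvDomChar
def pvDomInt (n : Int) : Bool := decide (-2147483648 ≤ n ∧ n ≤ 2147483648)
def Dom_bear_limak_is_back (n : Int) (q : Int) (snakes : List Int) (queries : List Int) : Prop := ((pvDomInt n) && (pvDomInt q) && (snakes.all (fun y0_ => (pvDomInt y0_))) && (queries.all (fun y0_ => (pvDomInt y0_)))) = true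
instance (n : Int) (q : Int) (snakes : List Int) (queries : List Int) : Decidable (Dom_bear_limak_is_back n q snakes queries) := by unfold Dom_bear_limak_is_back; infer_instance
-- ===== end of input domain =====

-- B replaces A's per-query linear greedy scan by sort + prefix sums + two binary
-- searches per query on the monotone feasibility condition (objective: faster).


-- ===== PORT A =====
-- A's while-loop, fuel-bounded (fuel only makes the recursion structural; inside
-- Pre_ it never runs out, and the out-of-range read never happens).
def pvALoop (s : List Int) (n k : Int) : Nat → Int → Int → Int
  | 0, i, _ => i + 1
  | fuel+1, i, j =>
    if i = n - 1 then i + 1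
    else
      match PySem.List.pyGet? s (i + 1) with
      | none => 0   -- IndexError in Python; excluded by Pre_
      | some l =>
        if k ≤ l then pvALoop s n k fuel (i + 1) j
        else if n - 1 - (i + 1) - j < k - l then ((i + 1) - 1) + 1
        else pvALoop s n k fuel (i + 1) (j + (k - l))

def bear_limak_is_back (n : Int) (q : Int) (snakes : List Int) (queries : List Int) : List Int :=
  let s := PySem.List.sorted snakes (fun x => x) true
  queries.map (fun k => pvALoop s n k (n.toNat + 1) (-1) 0)

-- ===== PORT B =====
-- first binary search of Source B: c = number of snakes >= k
def pvCntLoop (s : List Int) (k : Int) : Nat → Nat → Nat → Nat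
  | 0, lo, _ => lo
  | fuel+1, lo, hi =>
    if lo < hi then
      let mid := (lo + hi) / 2
      if k ≤ s.getD mid 0 then pvCntLoop s k fuel (mid + 1) hi
      else pvCntLoop s k fuel lo mid
    else lo

-- second binary search of Source B: largest m in [c, ns] with k*(m-c)-(pre[m]-pre[c]) <= ns-m
def pvFeasLoop (k : Int) (pre : List Int) (c ns : Nat) : Nat → Nat → Nat → Nat
  | 0, lo, _ => lo
  | fuel+1, lo, hi =>
    if lo < hi then
      let mid := (lo + hi + 1) / 2
      if k * ((mid : Int) - (c : Int)) - (pre.getD mid 0 - pre.getD c 0) ≤ (ns : Int) - (mid : Int)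
      then pvFeasLoop k pre c ns fuel mid hi
      else pvFeasLoop k pre c ns fuel lo (mid - 1)
    else lo

def bear_limak_is_back_alt (n : Int) (q : Int) (snakes : List Int) (queries : List Int) : List Int :=
  let s := PySem.List.slice (PySem.List.sorted snakes (fun x => x) true) none (some n)
  let ns := s.length
  let pre := s.foldl (fun p x => p ++ [p.getLastD 0 + x]) [(0 : Int)]
  queries.map (fun k =>
    let c := pvCntLoop s k (ns + 1) 0 ns
    ((pvFeasLoop k pre c ns (ns + 1) c ns : Nat) : Int))

-- ===== PRECONDITION & SPEC =====
-- Pre_ restricts to the natural domain: n is the number of snakes considered, so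
-- 0 ≤ n ≤ len(snakes).  For n > len(snakes) A raises IndexError; for n < 0 A's
-- occasional return values come from leftover loop state while B's negative-slice
-- reading differs — neither behaviour is specified for a negative count.
def Pre_bear_limak_is_back (n : Int) (q : Int) (snakes : List Int) (queries : List Int) : Prop :=
  0 ≤ n ∧ n ≤ (snakes.length : Int)
instance (n : Int) (q : Int) (snakes : List Int) (queries : List Int) : Decidable (Pre_bear_limak_is_back n q snakes queries) := by unfold Pre_bear_limak_is_back; infer_instance

def pvWitness_bear_limak_is_back : Int × Int × List Int × List Int := (2, 1, [3, 5], [4])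

def Spec_bear_limak_is_back (n : Int) (q : Int) (snakes : List Int) (queries : List Int) (out : List Int) : Prop := out = bear_limak_is_back_alt n q snakes queries
instance (n : Int) (q : Int) (snakes : List Int) (queries : List Int) (out : List Int) : Decidable (Spec_bear_limak_is_back n q snakes queries out) := by unfold Spec_bear_limak_is_back; infer_instance

-- ===== CLAIM (what is proved, stated in full; the proofs are below) =====
def Claim_equal_bear_limak_is_back : Prop := ∀ (n : Int) (q : Int) (snakes : List Int) (queries : List Int), Dom_bear_limak_is_back n q snakes queries → Pre_bear_limak_is_back n q snakes queries → Spec_bear_limak_is_back n q snakes queries (bear_limak_is_back n q snakes queries)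

-- ===== LEMMAS AND PROOFS =====

-- total deficit of the top m snakes (t is the descending-sorted list)
def pvDsum (t : List Int) (k : Int) : Nat → Int
  | 0 => 0
  | m+1 => pvDsum t k m + max (k - t.getD m 0) 0

-- feasibility: the top m snakes can all be grown to ≥ k using the other n - m
def pvFeas (t : List Int) (k : Int) (N m : Nat) : Prop := pvDsum t k m + (m : Int) ≤ (N : Int)

lemma pvDsum_nonneg (t : List Int) (k : Int) (m : Nat) : 0 ≤ pvDsum t k m := by
  induction m with
  | zero => simp [pvDsum]
  | succ m ih => simp only [pvDsum]; positivity

lemma pvFeas_le (t : List Int) (k : Int) (N m : Nat) (h : pvFeas t k N m) : m ≤ N := by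
  have := pvDsum_nonneg t k m
  unfold pvFeas at h; omega

lemma pvFeas_antitone (t : List Int) (k : Int) (N : Nat) {m m' : Nat} (hmm : m ≤ m')
    (h : pvFeas t k N m') : pvFeas t k N m := by
  induction m' with
  | zero =>
    have : m = 0 := by omega
    subst this; exact h
  | succ m' ih =>
    rcases Nat.lt_or_ge m (m'+1) with hlt | hge
    · apply ih (by omega)
      have := pvDsum_nonneg t k m'
      unfold pvFeas at h ⊢
      simp only [pvDsum] at h
      have : max (k - t.getD m' 0) 0 ≥ 0 := le_max_right _ _
      push_cast at h ⊢; omega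
    · have : m = m' + 1 := by omega
      subst this; exact h

def pvIsAns (t : List Int) (k : Int) (N m : Nat) : Prop :=
  pvFeas t k N m ∧ (m = N ∨ ¬ pvFeas t k N (m+1))

lemma pvIsAns_unique (t : List Int) (k : Int) (N : Nat) {m1 m2 : Nat}
    (h1 : pvIsAns t k N m1) (h2 : pvIsAns t k N m2) : m1 = m2 := by
  by_contra hne
  rcases Nat.lt_or_ge m1 m2 with h | h
  · have hm2N := pvFeas_le t k N m2 h2.1
    have : ¬ pvFeas t k N (m1+1) := by
      rcases h1.2 with he | hf
      · omega
      · exact hf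
    exact this (pvFeas_antitone t k N (by omega) h2.1)
  · have h' : m2 < m1 := by omega
    have hm1N := pvFeas_le t k N m1 h1.1
    have : ¬ pvFeas t k N (m2+1) := by
      rcases h2.2 with he | hf
      · omega
      · exact hf
    exact this (pvFeas_antitone t k N (by omega) h1.1)

-- sortedness in index form
def pvSortedD (t : List Int) : Prop := ∀ a b : Nat, a ≤ b → b < t.length → t.getD b 0 ≤ t.getD a 0

lemma pvDsum_zero_of_ge (t : List Int) (k : Int) (m : Nat)
    (h : ∀ i : Nat, i < m → k ≤ t.getD i 0) : pvDsum t k m = 0 := by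
  induction m with
  | zero => rfl
  | succ m ih =>
    simp only [pvDsum]
    rw [ih (fun i hi => h i (by omega))]
    have hk := h m (by omega)
    rw [max_eq_right (by omega : k - t.getD m 0 ≤ 0)]
    ring

lemma pvGetD_take (t : List Int) (N i : Nat) (h : i < N) : (t.take N).getD i 0 = t.getD i 0 := by
  simp [List.getD_eq_getElem?_getD, h]

-- ===== A-loop characterisation =====
lemma pvALoop_spec (t : List Int) (k : Int) (N : Nat) (hs : pvSortedD t) (hN : N ≤ t.length) :
    ∀ (fuel m0 : Nat), m0 ≤ N → N - m0 + 1 ≤ fuel → pvFeas t k N m0 →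
    ∃ m : Nat, pvALoop t (N : Int) k fuel ((m0 : Int) - 1) (pvDsum t k m0) = (m : Int) ∧ pvIsAns t k N m := by
  intro fuel
  induction fuel with
  | zero => intro m0 hm0 hfuel _; omega
  | succ fuel ih =>
    intro m0 hm0 hfuel hfeas
    by_cases hend : m0 = N
    · refine ⟨m0, ?_, hfeas, Or.inl hend⟩
      simp only [pvALoop]
      rw [if_pos (by rw [hend])]
      ring
    · have hlt : m0 < N := by omega
      have hml : m0 < t.length := by omega
      simp only [pvALoop]
      rw [if_neg (by omega)]
      have hget : PySem.List.pyGet? t ((m0 : Int) - 1 + 1) = some (t.getD m0 0) := by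
        have e : ((m0 : Int) - 1 + 1) = ((m0 : Nat) : Int) := by ring
        rw [e, PySem.List.pyGet?_natCast]
        simp [List.getElem?_eq_getElem hml, List.getD_eq_getElem?_getD]
      rw [hget]
      dsimp only
      by_cases hkl : k ≤ t.getD m0 0
      · rw [if_pos hkl]
        have hD : pvDsum t k (m0+1) = pvDsum t k m0 := by
          simp only [pvDsum]
          rw [max_eq_right (by omega : k - t.getD m0 0 ≤ 0)]; ring
        have hzero : pvDsum t k (m0+1) = 0 :=
          pvDsum_zero_of_ge t k (m0+1) (fun i hi => le_trans hkl (hs i m0 (by omega) hml))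
        have hfeas' : pvFeas t k N (m0+1) := by
          unfold pvFeas; rw [hzero]; push_cast; omega
        obtain ⟨m, hm, hans⟩ := ih (m0+1) (by omega) (by omega) hfeas'
        refine ⟨m, ?_, hans⟩
        calc pvALoop t (N : Int) k fuel ((m0 : Int) - 1 + 1) (pvDsum t k m0)
            = pvALoop t (N : Int) k fuel (((m0+1 : Nat) : Int) - 1) (pvDsum t k (m0+1)) := by
              rw [hD]; congr 1; push_cast; ring
          _ = (m : Int) := hm
      · rw [if_neg hkl]
        have hD : pvDsum t k (m0+1) = pvDsum t k m0 + (k - t.getD m0 0) := by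
          simp only [pvDsum]
          rw [max_eq_left (by omega : (0:Int) ≤ k - t.getD m0 0)]
        by_cases hbrk : (N : Int) - 1 - ((m0 : Int) - 1 + 1) - pvDsum t k m0 < k - t.getD m0 0
        · rw [if_pos hbrk]
          refine ⟨m0, by ring, hfeas, Or.inr ?_⟩
          unfold pvFeas; rw [hD]; push_cast at hbrk ⊢; omega
        · rw [if_neg hbrk]
          have hfeas' : pvFeas t k N (m0+1) := by
            unfold pvFeas; rw [hD]; push_cast at hbrk ⊢; omega
          obtain ⟨m, hm, hans⟩ := ih (m0+1) (by omega) (by omega) hfeas'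
          refine ⟨m, ?_, hans⟩
          calc pvALoop t (N : Int) k fuel ((m0 : Int) - 1 + 1) (pvDsum t k m0 + (k - t.getD m0 0))
              = pvALoop t (N : Int) k fuel (((m0+1 : Nat) : Int) - 1) (pvDsum t k (m0+1)) := by
                rw [hD]; congr 1; push_cast; ring
            _ = (m : Int) := hm

-- ===== B-side =====
lemma pvCntLoop_spec (t t' : List Int) (k : Int) (N : Nat) (hs : pvSortedD t) (hN : N ≤ t.length)
    (ht' : t' = t.take N) :
    ∀ (fuel lo hi : Nat), lo ≤ hi → hi ≤ N → hi - lo + 1 ≤ fuel →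
    (∀ i : Nat, i < lo → k ≤ t.getD i 0) → (∀ i : Nat, hi ≤ i → i < N → t.getD i 0 < k) →
    ∃ c : Nat, pvCntLoop t' k fuel lo hi = c ∧ lo ≤ c ∧ c ≤ hi ∧
      (∀ i : Nat, i < c → k ≤ t.getD i 0) ∧ (∀ i : Nat, c ≤ i → i < N → t.getD i 0 < k) := by
  intro fuel
  induction fuel with
  | zero => intro lo hi h1 h2 h3 _ _; omega
  | succ fuel ih =>
    intro lo hi hlohi hhiN hfuel hlow hhigh
    by_cases h : lo < hi
    · simp only [pvCntLoop]
      rw [if_pos h]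
      have hmid1 : lo ≤ (lo+hi)/2 := by omega
      have hmid2 : (lo+hi)/2 < hi := by omega
      have hget : t'.getD ((lo+hi)/2) 0 = t.getD ((lo+hi)/2) 0 := by
        rw [ht']; exact pvGetD_take t N _ (by omega)
      rw [hget]
      by_cases hk : k ≤ t.getD ((lo+hi)/2) 0
      · rw [if_pos hk]
        obtain ⟨c, hc, h1, h2, h3, h4⟩ := ih ((lo+hi)/2 + 1) hi (by omega) hhiN (by omega)
          (fun i hi' => le_trans hk (hs i ((lo+hi)/2) (by omega) (by omega))) hhigh
        exact ⟨c, hc, by omega, h2, h3, h4⟩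
      · rw [if_neg hk]
        obtain ⟨c, hc, h1, h2, h3, h4⟩ := ih lo ((lo+hi)/2) (by omega) (by omega) (by omega)
          hlow (fun i hi1 hi2 => lt_of_le_of_lt (hs ((lo+hi)/2) i hi1 (by omega)) (by omega))
        exact ⟨c, hc, h1, by omega, h3, h4⟩
    · simp only [pvCntLoop]
      rw [if_neg h]
      exact ⟨lo, rfl, le_refl lo, by omega, hlow, fun i hi1 hi2 => hhigh i (by omega) hi2⟩

lemma pvFeasLoop_spec (t : List Int) (k : Int) (N c : Nat) (pre : List Int)
    (hcond : ∀ m : Nat, c < m → m ≤ N →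
      ((k * ((m : Int) - (c : Int)) - (pre.getD m 0 - pre.getD c 0) ≤ (N : Int) - (m : Int)) ↔ pvFeas t k N m)) :
    ∀ (fuel lo hi : Nat), c ≤ lo → lo ≤ hi → hi ≤ N → hi - lo + 1 ≤ fuel →
    pvFeas t k N lo → (∀ m : Nat, hi < m → m ≤ N → ¬ pvFeas t k N m) →
    ∃ r : Nat, pvFeasLoop k pre c N fuel lo hi = r ∧ pvIsAns t k N r := by
  intro fuel
  induction fuel with
  | zero => intro lo hi h1 h2 h3 _ _ _; omega
  | succ fuel ih =>
    intro lo hi hclo hlohi hhiN hfuel hfeaslo hhigh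
    by_cases h : lo < hi
    · simp only [pvFeasLoop]
      rw [if_pos h]
      have hmid1 : lo < (lo+hi+1)/2 := by omega
      have hmid2 : (lo+hi+1)/2 ≤ hi := by omega
      have hiff := hcond ((lo+hi+1)/2) (by omega) (by omega)
      by_cases hk : k * ((((lo+hi+1)/2 : Nat) : Int) - (c : Int)) - (pre.getD ((lo+hi+1)/2) 0 - pre.getD c 0) ≤ (N : Int) - (((lo+hi+1)/2 : Nat) : Int)
      · rw [if_pos hk]
        exact ih ((lo+hi+1)/2) hi (by omega) hmid2 hhiN (by omega) (hiff.mp hk) hhigh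
      · rw [if_neg hk]
        have hnf : ¬ pvFeas t k N ((lo+hi+1)/2) := fun hf => hk (hiff.mpr hf)
        exact ih lo ((lo+hi+1)/2 - 1) hclo (by omega) (by omega) (by omega) hfeaslo
          (fun m hm1 hm2 hf => hnf (pvFeas_antitone t k N (by omega) hf))
    · simp only [pvFeasLoop]
      rw [if_neg h]
      have hlo : lo = hi := by omega
      refine ⟨lo, rfl, hfeaslo, ?_⟩
      by_cases hN : lo = N
      · exact Or.inl hN
      · exact Or.inr (hhigh (lo+1) (by omega) (by omega))

-- index form of "sorted descending"
lemma pvSorted_sortedD (xs : List Int) : pvSortedD (PySem.List.sorted xs (fun x => x) true) := by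
  intro a b hab hb
  rcases eq_or_lt_of_le hab with rfl | hlt
  · exact le_refl _
  · have hp : (PySem.List.sorted xs (fun x => x) true).Pairwise (fun a b => b ≤ a) := by
      have := PySem.List.sorted_pairwise_rev (xs := xs) (key := fun x => x)
      simpa using this
    rw [List.pairwise_iff_getElem] at hp
    have h := hp a b (by omega) hb hlt
    rw [List.getD_eq_getElem _ 0 hb, List.getD_eq_getElem _ 0 (by omega)]
    exact h

-- running prefix sums, as Source B's fold builds them
def pvScan (a : Int) : List Int → List Int
  | [] => []
  | x :: xs => (a + x) :: pvScan (a + x) xs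

lemma pvFoldPre (u : List Int) : ∀ (p : List Int), p ≠ [] →
    u.foldl (fun p x => p ++ [p.getLastD 0 + x]) p = p ++ pvScan (p.getLastD 0) u := by
  induction u with
  | nil => intro p _; simp [pvScan]
  | cons x xs ih =>
    intro p hp
    simp only [List.foldl_cons]
    rw [ih (p ++ [p.getLastD 0 + x]) (by simp)]
    simp [pvScan]

lemma pvScan_getD (u : List Int) : ∀ (m : Nat) (a : Int), m < u.length →
    (pvScan a u).getD m 0 = a + (u.take (m+1)).sum := by
  induction u with
  | nil => intro m a hm; simp at hm
  | cons x xs ih =>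
    intro m a hm
    cases m with
    | zero => simp [pvScan]
    | succ m =>
      simp only [pvScan, List.getD_cons_succ]
      rw [ih m (a + x) (by simpa using hm)]
      simp [List.take_succ_cons]
      ring

lemma pvPre_getD (u : List Int) (m : Nat) (hm : m ≤ u.length) :
    (u.foldl (fun p x => p ++ [p.getLastD 0 + x]) [0]).getD m 0 = (u.take m).sum := by
  rw [pvFoldPre u [0] (by simp)]
  cases m with
  | zero => simp
  | succ m =>
    have h0 : ([(0:Int)]).getLastD 0 = 0 := rfl
    rw [h0]
    show ((0:Int) :: pvScan 0 u).getD (m+1) 0 = (u.take (m+1)).sum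
    rw [List.getD_cons_succ, pvScan_getD u m 0 (by omega)]
    ring

-- the deficit sum in closed form, between the two binary-search boundaries
lemma pvDsum_formula (t : List Int) (k : Int) (N c : Nat) (hN : N ≤ t.length)
    (hhigh : ∀ i : Nat, c ≤ i → i < N → t.getD i 0 < k)
    (hlow : ∀ i : Nat, i < c → k ≤ t.getD i 0) :
    ∀ m : Nat, c ≤ m → m ≤ N →
      pvDsum t k m = k * ((m : Int) - (c : Int)) - ((t.take m).sum - (t.take c).sum) := by
  intro m
  induction m with
  | zero =>
    intro h1 _
    have : c = 0 := by omega
    subst this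
    simp [pvDsum]
  | succ m ih =>
    intro h1 h2
    by_cases hcm : c = m + 1
    · rw [pvDsum_zero_of_ge t k (m+1) (fun i hi => hlow i (by omega))]
      subst hcm
      simp
    · have hc : c ≤ m := by omega
      have hmN : m < N := by omega
      have hml : m < t.length := by omega
      simp only [pvDsum]
      rw [ih hc (by omega),
        max_eq_left (by have := hhigh m hc hmN; omega : (0:Int) ≤ k - t.getD m 0),
        List.sum_take_succ _ m hml, List.getD_eq_getElem t 0 hml]
      push_cast
      ring

theorem bear_limak_is_back_spec : Claim_equal_bear_limak_is_back := by
  intro n q snakes queries _ hpre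
  obtain ⟨hn0, hnlen⟩ := hpre
  unfold Spec_bear_limak_is_back
  simp only [bear_limak_is_back, bear_limak_is_back_alt]
  have hlen : (PySem.List.sorted snakes (fun x => x) true).length = snakes.length :=
    PySem.List.length_sorted ..
  set t := PySem.List.sorted snakes (fun x => x) true with ht
  set N := n.toNat with hNdef
  have hnN : n = (N : Int) := by omega
  have hN : N ≤ t.length := by omega
  have hs : pvSortedD t := pvSorted_sortedD snakes
  have hslice : PySem.List.slice t none (some n) = t.take N := PySem.List.slice_to t hn0
  rw [hslice, hnN]
  have hlens : (t.take N).length = N := by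
    rw [List.length_take]
    omega
  rw [hlens]
  apply List.map_congr_left
  intro k _
  -- A's loop computes the unique answer
  obtain ⟨m, hm, hansA⟩ := pvALoop_spec t k N hs hN (N + 1) 0 (by omega) (by omega)
    (by unfold pvFeas; simp [pvDsum])
  have hmA : pvALoop t (N : Int) k (N + 1) (-1) 0 = (m : Int) := by
    have e : ((0 : Nat) : Int) - 1 = -1 := by ring
    rw [← e, show (0 : Int) = pvDsum t k 0 from rfl]
    exact hm
  -- B's first binary search
  obtain ⟨c, hc, _, hcN, hclow, hchigh⟩ := pvCntLoop_spec t (t.take N) k N hs hN rfl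
    (N + 1) 0 N (by omega) (by omega) (by omega)
    (fun i hi => absurd hi (by omega)) (fun i hi1 hi2 => absurd (lt_of_le_of_lt hi1 hi2) (by omega))
  have hfeasc : pvFeas t k N c := by
    unfold pvFeas
    rw [pvDsum_zero_of_ge t k c hclow]
    omega
  -- the feasibility test of B's second search is exactly pvFeas on (c, N]
  have hcond : ∀ m : Nat, c < m → m ≤ N →
      ((k * ((m : Int) - (c : Int)) -
          (((t.take N).foldl (fun p x => p ++ [p.getLastD 0 + x]) [0]).getD m 0 -
            ((t.take N).foldl (fun p x => p ++ [p.getLastD 0 + x]) [0]).getD c 0) ≤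
        (N : Int) - (m : Int)) ↔ pvFeas t k N m) := by
    intro m hm1 hm2
    rw [pvPre_getD (t.take N) m (by omega), pvPre_getD (t.take N) c (by omega)]
    rw [List.take_take, List.take_take, min_eq_left hm2, min_eq_left hcN]
    unfold pvFeas
    rw [pvDsum_formula t k N c hN hchigh hclow m (by omega) hm2]
    omega
  obtain ⟨r, hr, hansB⟩ := pvFeasLoop_spec t k N c _ hcond (N + 1) c N (le_refl c) hcN
    (le_refl N) (by omega) hfeasc (fun m' hm1 hm2 => absurd (le_trans hm2 (le_refl N)) (by omega))
  rw [hmA, hc, hr, pvIsAns_unique t k N hansA hansB]
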